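-- pv_equiv track=rewrite | github.com/f776655321/DBMS | ColumnMatcher/column_matcher_test.py | get_count_matching_q_grams
-- ===== SOURCE A (Python) =====
-- def get_qgrams(q,s):
--     res = set()
--     assert q > 0
--     if q > len(s):
--         return res
--     if q == len(s):
--         res.add(s)
--         return res
--
--     end = len(s) - q + 1
--
--     for i in range(end):
--         res.add(s[i:i+q])
--
--     return res
--
-- def get_count_matching_q_grams(q, src_set, target_set):
--     cnt = 0
--     for src in src_set:
--         src_qgrams = get_qgrams(q, src)
--         for t in target_set:
--             t_qgrams = get_qgrams(q, t)
--             if not src_qgrams.isdisjoint(t_qgrams):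
--                 cnt += 1
--                 break
--
--     return cnt
-- ===== SOURCE B (Python) =====
-- def _qgrams(q, s):
--     if q <= 0 or q > len(s):
--         return set()
--     return {s[i:i + q] for i in range(len(s) - q + 1)}
--
--
-- def get_count_matching_q_grams(q, src_set, target_set):
--     target_grams = set()
--     for t in target_set:
--         target_grams |= _qgrams(q, t)
--     return sum(1 for src in src_set if not _qgrams(q, src).isdisjoint(target_grams))
-- ===== Notes on version B (the rewrite author's own statement) =====
-- stated objective: faster
-- what changed: B computes the union of all targets' q-grams once and then counts sources by a single membership-intersection test against that union, instead of A's nested loop that recomputes every target's q-grams for every source.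
import Mathlib
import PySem

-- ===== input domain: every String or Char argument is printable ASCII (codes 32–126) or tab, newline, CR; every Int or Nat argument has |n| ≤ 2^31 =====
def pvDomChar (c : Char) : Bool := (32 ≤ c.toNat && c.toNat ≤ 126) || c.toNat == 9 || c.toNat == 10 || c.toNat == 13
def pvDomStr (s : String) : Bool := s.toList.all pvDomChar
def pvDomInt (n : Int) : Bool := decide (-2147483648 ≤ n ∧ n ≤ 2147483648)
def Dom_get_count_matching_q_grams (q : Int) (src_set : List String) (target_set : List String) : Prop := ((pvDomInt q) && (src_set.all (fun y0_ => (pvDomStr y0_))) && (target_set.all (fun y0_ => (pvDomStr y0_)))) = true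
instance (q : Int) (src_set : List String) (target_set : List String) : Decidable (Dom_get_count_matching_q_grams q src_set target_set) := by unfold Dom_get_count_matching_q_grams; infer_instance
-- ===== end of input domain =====

-- B replaces A's nested rescan of target_set per source by one precomputed union of all
-- targets' q-grams, then counts sources intersecting it (objective: faster).

-- ===== PORT A =====
-- get_qgrams(q, s); its 'assert q > 0' raises AssertionError for q ≤ 0 — those calls are excluded by Pre_
def get_qgrams (q : Int) (s : String) : PySem.Set String :=
  let res : PySem.Set String := PySem.Set.empty
  if q > PySem.Str.len s then res
  else if q = PySem.Str.len s then PySem.Set.add res s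
  else
    let endi : Int := PySem.Str.len s - q + 1
    (PySem.List.pyRange 0 endi 1).foldl
      (fun r i => PySem.Set.add r (PySem.Str.slice s (some i) (some (i + q)))) res

-- the inner 'for t in target_set: … break' loop of A
def a_inner (q : Int) (src_qgrams : PySem.Set String) : List String → Bool
  | [] => false
  | t :: ts =>
    let t_qgrams := get_qgrams q t
    if !(PySem.Set.isdisjoint src_qgrams t_qgrams) then true else a_inner q src_qgrams ts

def get_count_matching_q_grams (q : Int) (src_set : List String) (target_set : List String) : Int :=
  src_set.foldl
    (fun cnt src =>
      let src_qgrams := get_qgrams q src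
      if a_inner q src_qgrams target_set then cnt + 1 else cnt) 0

-- ===== PORT B =====
def qgrams_alt (q : Int) (s : String) : PySem.Set String :=
  if q ≤ 0 ∨ PySem.Str.len s < q then PySem.Set.empty
  else PySem.Set.ofList ((PySem.List.pyRange 0 (PySem.Str.len s - q + 1) 1).map
        (fun i => PySem.Str.slice s (some i) (some (i + q))))

def get_count_matching_q_grams_alt (q : Int) (src_set : List String) (target_set : List String) : Int :=
  let target_grams : PySem.Set String :=
    target_set.foldl (fun acc t => PySem.Set.union acc (qgrams_alt q t)) PySem.Set.empty
  (src_set.map (fun src =>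
      if !(PySem.Set.isdisjoint (qgrams_alt q src) target_grams) then (1 : Int) else 0)).sum

-- ===== PRECONDITION & SPEC =====
-- A raises AssertionError (assert q > 0 in get_qgrams) whenever q ≤ 0 and src_set is non-empty;
-- Pre_ excludes exactly those inputs. A returns normally everywhere else.
def Pre_get_count_matching_q_grams (q : Int) (src_set : List String) (target_set : List String) : Prop :=
  0 < q ∨ src_set = []
instance (q : Int) (src_set : List String) (target_set : List String) : Decidable (Pre_get_count_matching_q_grams q src_set target_set) := by unfold Pre_get_count_matching_q_grams; infer_instance

def pvWitness_get_count_matching_q_grams : Int × List String × List String :=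
  (2, ["abcd", "xy"], ["bcde", "zz"])

def Spec_get_count_matching_q_grams (q : Int) (src_set : List String) (target_set : List String) (out : Int) : Prop := out = get_count_matching_q_grams_alt q src_set target_set
instance (q : Int) (src_set : List String) (target_set : List String) (out : Int) : Decidable (Spec_get_count_matching_q_grams q src_set target_set out) := by unfold Spec_get_count_matching_q_grams; infer_instance

-- ===== CLAIM (what is proved, stated in full; the proofs are below) =====
def Claim_equal_get_count_matching_q_grams : Prop := ∀ (q : Int) (src_set : List String) (target_set : List String), Dom_get_count_matching_q_grams q src_set target_set → Pre_get_count_matching_q_grams q src_set target_set → Spec_get_count_matching_q_grams q src_set target_set (get_count_matching_q_grams q src_set target_set)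

-- ===== LEMMAS AND PROOFS =====

-- For 0 < q, A's get_qgrams and B's _qgrams build the very same set.
theorem qgrams_eq (q : Int) (hq : 0 < q) (s : String) : get_qgrams q s = qgrams_alt q s := by
  unfold get_qgrams qgrams_alt
  rcases lt_trichotomy q (PySem.Str.len s) with h | h | h
  · -- q < len s : foldl add over the range = ofList of the mapped range
    rw [if_neg (by omega), if_neg (by omega), if_neg (by omega),
      ← PySem.Set.update_empty, PySem.Set.update_map_eq_foldl_add]
  · -- q = len s : A adds the whole string; B's range is [0] and s[0:q] = s
    subst h
    have hq' : (0:Int) < PySem.Str.len s := hq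
    rw [if_neg (by omega), if_pos rfl, if_neg (by omega)]
    have hr : PySem.List.pyRange 0 (PySem.Str.len s - PySem.Str.len s + 1) 1 = [0] := by
      norm_num
      decide
    have hslice : PySem.Str.slice s (some 0) (some (0 + PySem.Str.len s)) = s := by
      simp [PySem.Str.slice, PySem.Str.len, String.ofList, -String.length_toList, List.take_length]
    rw [hr, List.map_cons, List.map_nil, hslice]
    rfl
  · rw [if_pos h, if_pos (Or.inr h)]

-- membership in B's folded union of the targets' q-gram sets
theorem mem_target_union (q : Int) (ts : List String) (acc : PySem.Set String) (g : String) :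
    g ∈ ts.foldl (fun acc t => PySem.Set.union acc (qgrams_alt q t)) acc ↔
      g ∈ acc ∨ ∃ t ∈ ts, g ∈ qgrams_alt q t := by
  induction ts generalizing acc with
  | nil => simp
  | cons t ts ih =>
    simp only [List.foldl_cons, ih, PySem.Set.mem_union, List.mem_cons]
    constructor
    · rintro (( h | h) | ⟨u, hu, hg⟩)
      · exact Or.inl h
      · exact Or.inr ⟨t, Or.inl rfl, h⟩
      · exact Or.inr ⟨u, Or.inr hu, hg⟩
    · rintro (h | ⟨u, (rfl | hu), hg⟩)
      · exact Or.inl (Or.inl h)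
      · exact Or.inl (Or.inr hg)
      · exact Or.inr ⟨u, hu, hg⟩

-- A's inner break-loop is exactly "some target shares a q-gram"
theorem a_inner_eq (q : Int) (hq : 0 < q) (S : PySem.Set String) (ts : List String) :
    a_inner q S ts = true ↔ ∃ t ∈ ts, ∃ g ∈ S, g ∈ qgrams_alt q t := by
  induction ts with
  | nil => simp [a_inner]
  | cons t ts ih =>
    simp only [a_inner, qgrams_eq q hq]
    cases hd : PySem.Set.isdisjoint S (qgrams_alt q t) with
    | true =>
      have hnone : ∀ g ∈ S, g ∉ qgrams_alt q t := (PySem.Set.isdisjoint_iff S _).1 hd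
      simp only [Bool.not_true, Bool.false_eq_true, if_false, ih]
      constructor
      · rintro ⟨u, hu, hg⟩
        exact ⟨u, List.mem_cons_of_mem _ hu, hg⟩
      · rintro ⟨u, hu, g, hg, hg'⟩
        rcases List.mem_cons.1 hu with rfl | hu'
        · exact absurd hg' (hnone g hg)
        · exact ⟨u, hu', g, hg, hg'⟩
    | false =>
      have hsome : ∃ g ∈ S, g ∈ qgrams_alt q t := by
        by_contra hc
        push Not at hc
        simp [(PySem.Set.isdisjoint_iff S _).2 hc] at hd
      simp only [Bool.not_false, if_true, true_iff]
      exact ⟨t, List.mem_cons_self, hsome⟩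

-- ===== VERDICT (by name: the statement is the Claim_ definition above) =====
theorem get_count_matching_q_grams_spec : Claim_equal_get_count_matching_q_grams := by
  intro q src_set target_set _ hpre
  unfold Spec_get_count_matching_q_grams
  rcases hpre with hq | rfl
  · have hTG := mem_target_union q target_set PySem.Set.empty
    set TG : PySem.Set String :=
      target_set.foldl (fun acc t => PySem.Set.union acc (qgrams_alt q t)) PySem.Set.empty with hTGdef
    have hpred : ∀ s : String,
        a_inner q (get_qgrams q s) target_set = !(PySem.Set.isdisjoint (qgrams_alt q s) TG) := by
      intro s
      by_cases hx : ∃ g ∈ qgrams_alt q s, ∃ t ∈ target_set, g ∈ qgrams_alt q t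
      · have h1 : a_inner q (get_qgrams q s) target_set = true := by
          rw [a_inner_eq q hq, qgrams_eq q hq]
          obtain ⟨g, hg, t, ht, hgt⟩ := hx
          exact ⟨t, ht, g, hg, hgt⟩
        have h2 : PySem.Set.isdisjoint (qgrams_alt q s) TG = false := by
          apply Bool.eq_false_iff.mpr
          intro hd
          obtain ⟨g, hg, t, ht, hgt⟩ := hx
          exact ((PySem.Set.isdisjoint_iff _ _).1 hd g hg) ((hTG g).2 (Or.inr ⟨t, ht, hgt⟩))
        rw [h1, h2]; rfl
      · have h1 : a_inner q (get_qgrams q s) target_set = false := by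
          apply Bool.eq_false_iff.mpr
          intro hd
          rw [a_inner_eq q hq, qgrams_eq q hq] at hd
          obtain ⟨t, ht, g, hg, hgt⟩ := hd
          exact hx ⟨g, hg, t, ht, hgt⟩
        have h2 : PySem.Set.isdisjoint (qgrams_alt q s) TG = true := by
          rw [PySem.Set.isdisjoint_iff]
          intro g hg hmem
          rcases (hTG g).1 hmem with h | ⟨t, ht, hgt⟩
          · simp [PySem.Set.empty] at h
          · exact hx ⟨g, hg, t, ht, hgt⟩
        rw [h1, h2]; rfl
    simp only [get_count_matching_q_grams, get_count_matching_q_grams_alt, ← hTGdef]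
    rw [PySem.List.foldl_count_if, PySem.List.sum_map_ite_one_zero]
    norm_num
    exact List.countP_congr (fun s _ => by rw [hpred s])
  · simp [get_count_matching_q_grams, get_count_matching_q_grams_alt]
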